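-- pv_equiv track=rewrite | github.com/open-compass/opencompass | opencompass/datasets/teval/evaluators/reason_retrieve_understand_evaluator.py | input_postprocess
-- ===== SOURCE A (Python) =====
-- def input_postprocess(text: str) -> str:
--     if isinstance(text, str):
--         text = text.split('<|')[0]
--         text = text.split('<eoa>\n')[0]
--         text = text.split('<TOKENS_UNUSED_1>\n')[0]
--         text = text.split('<|im_end|>')[0]
--         if len(text) > 1 and text[:2] == '{{' and text[-2:] == '}}':
--             text = text[1:-1]
--         while len(text) > 0 and text[-1] == '\n':
--             text = text[:-1]
--     return str(text)
-- ===== SOURCE B (Python) =====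
-- def input_postprocess(text: str) -> str:
--     text = str(text)
--     stops = ('<|', '<eoa>\n', '<TOKENS_UNUSED_1>\n', '<|im_end|>')
--     out = []
--     i = 0
--     n = len(text)
--     while i < n and not any(text.startswith(tok, i) for tok in stops):
--         out.append(text[i])
--         i += 1
--     head = ''.join(out)
--     if head.startswith('{{') and head.endswith('}}'):
--         head = head[1:-1]
--     return head.rstrip('\n')
-- ===== Notes on version B (the rewrite author's own statement) =====
-- stated objective: alternative
-- what changed: Replaces the four staged split()[0] passes with a single streaming character scan that copies characters into an accumulator and halts as soon as any stop token begins at the current position, then unwraps '{{…}}' and rstrips newlines.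
import Mathlib
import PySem

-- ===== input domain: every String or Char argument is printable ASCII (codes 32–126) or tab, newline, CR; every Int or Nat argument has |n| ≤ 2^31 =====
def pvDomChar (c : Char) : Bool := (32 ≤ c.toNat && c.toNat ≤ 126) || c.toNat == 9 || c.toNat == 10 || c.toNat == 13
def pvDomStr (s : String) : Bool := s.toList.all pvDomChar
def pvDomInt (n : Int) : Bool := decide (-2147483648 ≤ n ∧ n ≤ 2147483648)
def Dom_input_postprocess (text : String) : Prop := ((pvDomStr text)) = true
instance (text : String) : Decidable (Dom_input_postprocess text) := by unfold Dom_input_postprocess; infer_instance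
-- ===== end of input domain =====

-- B replaces A's four staged split()[0] passes with one streaming character scan that copies
-- characters into an accumulator and stops as soon as any stop token begins at the current
-- position; objective: alternative decomposition, same cost.

-- ===== PORT A =====
-- text.split(sep)[0]: sep is a nonempty literal at every call site, so split? is always `some`,
-- and split never returns an empty list, so the [0] indexing never raises; the getD defaults
-- are unreachable.
def pySplit0 (s sep : String) : String :=
  (PySem.List.pyGet? ((PySem.Str.split? s sep).getD []) 0).getD ""

-- while len(text) > 0 and text[-1] == '\n': text = text[:-1]
def pyStripNlLoop (t : String) : String :=
  if 0 < PySem.Str.len t ∧ PySem.Str.pyGet? t (-1) = some '\n'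
  then pyStripNlLoop (PySem.Str.slice t none (some (-1)))
  else t
termination_by (PySem.Str.len t).toNat
decreasing_by
  rename_i h
  obtain ⟨h1, -⟩ := h
  simp only [PySem.Str.slice, PySem.Str.len, PySem.Chars.slice_eq_listSlice,
    PySem.List.slice_to_neg_one, String.toList_ofList] at *
  have : t.toList.dropLast.length = t.toList.length - 1 := List.length_dropLast
  omega

-- isinstance(text, str) is always true for a String argument, so the branch always runs,
-- and the final str(text) is the identity
def input_postprocess (text : String) : String :=
  let t := pySplit0 text "<|"
  let t := pySplit0 t "<eoa>\n"
  let t := pySplit0 t "<TOKENS_UNUSED_1>\n"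
  let t := pySplit0 t "<|im_end|>"
  let t := if 1 < PySem.Str.len t ∧ PySem.Str.slice t none (some 2) = "{{" ∧
              PySem.Str.slice t (some (-2)) none = "}}"
           then PySem.Str.slice t (some 1) (some (-1)) else t
  pyStripNlLoop t

-- ===== PORT B =====
-- the while loop over index i with 'text.startswith(tok, i)': startswith at position i is
-- exactly 'tok is a prefix of the suffix from i', so the index loop becomes structural
-- recursion on that suffix, with the accumulator 'out' built as the recursion returns
def scanStop (stops : List (List Char)) : List Char → List Char
  | [] => []
  | c :: r => if stops.any (fun t => t.isPrefixOf (c :: r)) then [] else c :: scanStop stops r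

def input_postprocess_alt (text : String) : String :=
  let stops : List (List Char) := ["<|".toList, "<eoa>\n".toList, "<TOKENS_UNUSED_1>\n".toList, "<|im_end|>".toList]
  let head := String.ofList (scanStop stops text.toList)
  let head := if PySem.Str.startswith head "{{" && PySem.Str.endswith head "}}"
              then PySem.Str.slice head (some 1) (some (-1)) else head
  -- head.rstrip('\n'): hand port, exact — removes the maximal run of trailing '\n'
  String.ofList ((head.toList.reverse.dropWhile (fun c => c = '\n')).reverse)

-- ===== PRECONDITION & SPEC =====
def Spec_input_postprocess (text : String) (out : String) : Prop := out = input_postprocess_alt text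
instance (text : String) (out : String) : Decidable (Spec_input_postprocess text out) := by unfold Spec_input_postprocess; infer_instance

-- ===== CLAIM (what is proved, stated in full; the proofs are below) =====
def Claim_equal_input_postprocess : Prop := ∀ (text : String), Dom_input_postprocess text → Spec_input_postprocess text (input_postprocess text)

-- ===== LEMMAS AND PROOFS =====

theorem go_nil (sep cur : List Char) (acc : List (List Char)) (fuel : Nat) :
    PySem.Chars.splitOn.go sep (fuel+1) [] cur acc = (cur.reverse :: acc).reverse := by
  rw [PySem.Chars.splitOn.go]
  omega

theorem go_cons (sep cur : List Char) (acc : List (List Char)) (fuel : Nat) (c : Char) (rest : List Char) :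
    PySem.Chars.splitOn.go sep (fuel+1) (c :: rest) cur acc =
      if sep.isPrefixOf (c :: rest) then
        PySem.Chars.splitOn.go sep fuel (List.drop sep.length (c :: rest)) [] (cur.reverse :: acc)
      else PySem.Chars.splitOn.go sep fuel rest (c :: cur) acc := by
  rw [PySem.Chars.splitOn.go]

theorem go_zero (sep : List Char) (l cur : List Char) (acc : List (List Char)) :
    PySem.Chars.splitOn.go sep 0 l cur acc = ((cur.reverse ++ l) :: acc).reverse := by
  rw [PySem.Chars.splitOn.go]

theorem go_acc' (sep : List Char) : ∀ (fuel : Nat) (l cur : List Char) (acc : List (List Char)),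
    PySem.Chars.splitOn.go sep fuel l cur acc = acc.reverse ++ PySem.Chars.splitOn.go sep fuel l cur [] := by
  intro fuel
  induction fuel with
  | zero => intro l cur acc; rw [go_zero, go_zero]; simp
  | succ fuel ih =>
    intro l cur acc
    cases l with
    | nil => rw [go_nil, go_nil]; simp
    | cons c rest =>
      rw [go_cons, go_cons]
      by_cases h : sep.isPrefixOf (c :: rest)
      · simp only [h, if_true]
        rw [ih _ _ (cur.reverse :: acc), ih _ _ [cur.reverse]]
        simp
      · simp only [h]
        exact ih _ _ acc

def piece (sep : List Char) : List Char → List Char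
  | [] => []
  | c :: r => if sep.isPrefixOf (c :: r) then [] else c :: piece sep r

theorem go_head' (sep : List Char) (hsep : sep ≠ []) : ∀ (fuel : Nat) (l cur : List Char),
    l.length ≤ fuel →
    ∃ rest, PySem.Chars.splitOn.go sep fuel l cur [] = (cur.reverse ++ piece sep l) :: rest := by
  intro fuel
  induction fuel with
  | zero =>
    intro l cur hl
    have : l = [] := List.eq_nil_of_length_eq_zero (Nat.le_zero.mp hl)
    subst this
    exact ⟨[], by rw [go_zero]; simp [piece]⟩
  | succ fuel ih =>
    intro l cur hl
    cases l with
    | nil => exact ⟨[], by rw [go_nil]; simp [piece]⟩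
    | cons c rest =>
      rw [go_cons]
      by_cases h : sep.isPrefixOf (c :: rest)
      · rw [if_pos h]
        have hlen : (List.drop sep.length (c :: rest)).length ≤ fuel := by
          have : 1 ≤ sep.length := by
            cases sep with
            | nil => exact absurd rfl hsep
            | cons a b => simp
          simp only [List.length_drop, List.length_cons] at *
          omega
        obtain ⟨r', hr'⟩ := ih (List.drop sep.length (c :: rest)) [] hlen
        rw [go_acc', hr']
        exact ⟨piece sep (List.drop sep.length (c :: rest)) :: r', by simp [piece, h]⟩
      · rw [if_neg h]
        obtain ⟨r', hr'⟩ := ih rest (c :: cur) (by simpa using Nat.lt_succ_iff.mp (by simpa using hl))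
        rw [hr']
        exact ⟨r', by simp [piece, h]⟩

theorem splitOn_head (s sep : List Char) (hsep : sep ≠ []) :
    ∃ rest, PySem.Chars.splitOn s sep = piece sep s :: rest := by
  obtain ⟨rest, hr⟩ := go_head' sep hsep (s.length + 1) s [] (by omega)
  exact ⟨rest, by simpa using hr⟩

theorem infix_iff_drop (sub s : List Char) : sub <:+: s ↔ ∃ j, sub <+: s.drop j := by
  rw [← PySem.Chars.isIn_iff_infix, ← PySem.Chars.exists_prefix_drop_iff_isIn]

theorem piece_eq_take (sep s : List Char) : piece sep s = s.take (piece sep s).length := by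
  induction s with
  | nil => rfl
  | cons c r ih =>
    by_cases h : sep.isPrefixOf (c :: r)
    · simp [piece, h]
    · simp only [piece, h, ite_false]
      exact congrArg (c :: ·) ih

theorem length_piece_le (sep s : List Char) : (piece sep s).length ≤ s.length := by
  induction s with
  | nil => simp [piece]
  | cons c r ih =>
    by_cases h : sep.isPrefixOf (c :: r) <;> simp [piece, h] <;> omega

theorem piece_of_not_infix {sep s : List Char} (h : ¬ sep <:+: s) : piece sep s = s := by
  induction s with
  | nil => rfl
  | cons c r ih =>
    have h1 : ¬ sep.isPrefixOf (c :: r) := by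
      intro hp
      exact h (List.IsPrefix.isInfix (List.isPrefixOf_iff_prefix.mp hp))
    have h2 : ¬ sep <:+: r := fun hi => h (List.infix_cons hi)
    simp [piece, h1, ih h2]

theorem piece_spec {sep s : List Char} (h : sep <:+: s) :
    sep <+: s.drop (piece sep s).length ∧ ∀ i < (piece sep s).length, ¬ sep <+: s.drop i := by
  induction s with
  | nil =>
    have hn : sep = [] := List.eq_nil_of_infix_nil h
    subst hn
    exact ⟨List.nil_prefix, by simp [piece]⟩
  | cons c r ih =>
    by_cases hp : sep.isPrefixOf (c :: r)
    · refine ⟨?_, by simp [piece, hp]⟩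
      simp [piece, hp, List.isPrefixOf_iff_prefix.mp hp]
    · have hr : sep <:+: r := by
        obtain ⟨j, hj⟩ := (infix_iff_drop sep (c :: r)).mp h
        cases j with
        | zero => exact absurd (List.isPrefixOf_iff_prefix.mpr (by simpa using hj)) hp
        | succ j' => exact (infix_iff_drop sep r).mpr ⟨j', by simpa using hj⟩
      obtain ⟨ih1, ih2⟩ := ih hr
      refine ⟨by simpa [piece, hp] using ih1, ?_⟩
      intro i hi
      simp [piece, hp] at hi
      cases i with
      | zero => exact fun hpre => hp (List.isPrefixOf_iff_prefix.mpr (by simpa using hpre))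
      | succ i' => simpa using ih2 i' (by omega)

theorem piece_length_eq {sep s : List Char} {n : Nat} (h1 : sep <+: s.drop n)
    (h2 : ∀ i < n, ¬ sep <+: s.drop i) : (piece sep s).length = n := by
  have hinf : sep <:+: s := (infix_iff_drop sep s).mpr ⟨n, h1⟩
  obtain ⟨s1, s2⟩ := piece_spec hinf
  rcases Nat.lt_trichotomy (piece sep s).length n with hlt | heq | hgt
  · exact absurd s1 (h2 _ hlt)
  · exact heq
  · exact absurd h1 (s2 n hgt)

def pvP (t : List Char) : Prop := t.head? = some '<' ∧ '<' ∉ t.tail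

theorem pvP_ne_nil {t : List Char} (h : pvP t) : t ≠ [] := by
  intro he; rw [he] at h; simpa using h.1

theorem pv_fit {t u s : List Char} {p q : Nat} (ht : pvP t) (hu : pvP u)
    (hp : t <+: s.drop p) (hq : u <+: s.drop q) (hqp : q < p) : q + u.length ≤ p := by
  by_contra hc
  push_neg at hc
  obtain ⟨c, tt, rfl⟩ : ∃ c tt, t = c :: tt := by
    cases t with
    | nil => exact absurd rfl (pvP_ne_nil ht)
    | cons a b => exact ⟨a, b, rfl⟩
  have hc' : c = '<' := by simpa using ht.1
  subst hc'
  obtain ⟨k, hk⟩ := hp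
  have hsp : s[p]? = some '<' := by
    have h0 : (s.drop p)[0]? = some '<' := by rw [← hk]; simp
    rw [List.getElem?_drop] at h0
    simpa using h0
  obtain ⟨d, ut, rfl⟩ : ∃ d ut, u = d :: ut := by
    cases u with
    | nil => exact absurd rfl (pvP_ne_nil hu)
    | cons a b => exact ⟨a, b, rfl⟩
  have hd : d = '<' := by simpa using hu.1
  subst hd
  obtain ⟨k2, hk2⟩ := hq
  have hlt : p - q < ('<' :: ut).length := by simp at hc ⊢; omega
  have hup : ('<' :: ut)[p - q]? = some '<' := by
    have e1 : (s.drop q)[p - q]? = s[p]? := by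
      rw [List.getElem?_drop]
      congr 1
      omega
    rw [← hk2] at e1
    rw [List.getElem?_append_left hlt] at e1
    rw [e1, hsp]
  obtain ⟨i, hi⟩ : ∃ i, p - q = i + 1 := ⟨p - q - 1, by omega⟩
  rw [hi] at hup
  simp only [List.getElem?_cons_succ] at hup
  exact hu.2 (by simpa using List.mem_of_getElem? hup)

theorem length_piece_piece {t u s : List Char} (ht : pvP t) (hu : pvP u) :
    (piece u (piece t s)).length = min (piece u s).length (piece t s).length := by
  by_cases hts : t <:+: s
  case neg =>
    rw [piece_of_not_infix hts]
    have := length_piece_le u s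
    omega
  case pos =>
    have hspec := piece_spec hts
    have hpt : piece t s = s.take (piece t s).length := piece_eq_take t s
    set p := (piece t s).length with hp
    have hple : p ≤ s.length := length_piece_le t s
    by_cases hu2 : u <:+: s.take p
    · obtain ⟨j, hj⟩ := (infix_iff_drop _ _).mp hu2
      rw [List.drop_take] at hj
      obtain ⟨hj1, hj2⟩ := List.prefix_take_iff.mp hj
      have hus : u <:+: s := (infix_iff_drop _ _).mpr ⟨j, hj1⟩
      have huspec := piece_spec hus
      set q := (piece u s).length with hq
      have hulen : 0 < u.length := List.length_pos_of_ne_nil (pvP_ne_nil hu)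
      have hqj : q ≤ j := by
        by_contra hc
        exact huspec.2 j (by omega) hj1
      have hqp' : q < p := by omega
      have hfit : q + u.length ≤ p := pv_fit ht hu hspec.1 huspec.1 hqp'
      have hq1 : u <+: (piece t s).drop q := by
        rw [hpt, List.drop_take]
        exact List.prefix_take_iff.mpr ⟨huspec.1, by omega⟩
      have hq2 : ∀ i < q, ¬ u <+: (piece t s).drop i := by
        intro i hi hpre
        rw [hpt, List.drop_take] at hpre
        exact huspec.2 i hi (List.prefix_take_iff.mp hpre).1
      rw [piece_length_eq hq1 hq2]
      omega
    · rw [piece_of_not_infix (by rw [hpt]; exact hu2)]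
      have hptlen : (piece t s).length = p := hp.symm
      have hqge : p ≤ (piece u s).length := by
        by_cases hus : u <:+: s
        · have huspec := piece_spec hus
          by_contra hc
          have hqp' : (piece u s).length < p := by omega
          have hfit : (piece u s).length + u.length ≤ p := pv_fit ht hu hspec.1 huspec.1 hqp'
          apply hu2
          refine (infix_iff_drop _ _).mpr ⟨(piece u s).length, ?_⟩
          rw [List.drop_take]
          exact List.prefix_take_iff.mpr ⟨huspec.1, by omega⟩
        · rw [piece_of_not_infix hus]; omega
      omega

theorem piece_prefix (sep s : List Char) : piece sep s <+: s := by
  rw [piece_eq_take sep s]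
  exact List.take_prefix _ _

theorem piece_piece' {t u s : List Char} (ht : pvP t) (hu : pvP u) :
    ∃ w, pvP w ∧ piece u (piece t s) = piece w s ∧
      (piece w s).length = min (piece u s).length (piece t s).length := by
  have hlen := length_piece_piece (s := s) ht hu
  have hpre : piece u (piece t s) <+: s := (piece_prefix u (piece t s)).trans (piece_prefix t s)
  rcases le_total (piece u s).length (piece t s).length with hle | hle
  · refine ⟨u, hu, ?_, by omega⟩
    have h2 : piece u s <+: s := piece_prefix u s
    have hl : (piece u (piece t s)).length = (piece u s).length := by omega
    exact (List.prefix_of_prefix_length_le hpre h2 (le_of_eq hl)).eq_of_length hl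
  · refine ⟨t, ht, ?_, by omega⟩
    have h2 : piece t s <+: s := piece_prefix t s
    have hl : (piece u (piece t s)).length = (piece t s).length := by omega
    exact (List.prefix_of_prefix_length_le hpre h2 (le_of_eq hl)).eq_of_length hl

theorem scan_take (stops : List (List Char)) (s : List Char) :
    scanStop stops s = s.take (scanStop stops s).length := by
  induction s with
  | nil => rfl
  | cons c r ih =>
    simp only [scanStop]
    split_ifs with h
    · simp
    · simpa using congrArg (c :: ·) ih

theorem scan_len (t1 t2 t3 t4 : List Char) (s : List Char) :
    (scanStop [t1, t2, t3, t4] s).length =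
      min (min (min (piece t1 s).length (piece t2 s).length) (piece t3 s).length)
        (piece t4 s).length := by
  induction s with
  | nil => simp [scanStop, piece]
  | cons c r ih =>
    simp only [scanStop, piece, List.any_cons, List.any_nil, Bool.or_false]
    by_cases h1 : t1.isPrefixOf (c :: r) <;> by_cases h2 : t2.isPrefixOf (c :: r) <;>
      by_cases h3 : t3.isPrefixOf (c :: r) <;> by_cases h4 : t4.isPrefixOf (c :: r) <;>
      simp [h1, h2, h3, h4, ih] <;> omega

theorem unwrap_cond (t : String) :
    (1 < PySem.Str.len t ∧ PySem.Str.slice t none (some 2) = "{{" ∧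
      PySem.Str.slice t (some (-2)) none = "}}")
    ↔ (PySem.Str.startswith t "{{" && PySem.Str.endswith t "}}") = true := by
  have htake : PySem.Str.slice t none (some 2) = String.ofList (t.toList.take 2) := by
    simp [PySem.Str.slice, PySem.List.slice_to _ (by omega : (0:Int) ≤ 2)]
  have hdrop : PySem.Str.slice t (some (-2)) none = String.ofList (t.toList.drop (t.toList.length - 2)) := by
    simp only [PySem.Str.slice, PySem.Chars.slice_eq_listSlice]
    rw [PySem.List.slice_from_neg_ofNat _ 2 (by omega)]
  rw [htake, hdrop]
  simp only [Bool.and_eq_true, PySem.Str.startswith, PySem.Str.endswith,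
    PySem.Chars.startswith_iff, PySem.Chars.endswith_iff, PySem.Str.len]
  constructor
  · rintro ⟨h1, h2, h3⟩
    have h1' : 1 < t.toList.length := by exact_mod_cast h1
    have e2 : t.toList.take 2 = "{{".toList := by
      have := congrArg String.toList h2
      simpa using this
    have e3 : t.toList.drop (t.toList.length - 2) = "}}".toList := by
      have := congrArg String.toList h3
      simpa using this
    have l2 : ("{{".toList).length = 2 := by decide
    have l3 : ("}}".toList).length = 2 := by decide
    constructor
    · rw [List.prefix_iff_eq_take, l2]
      exact e2.symm
    · rw [List.suffix_iff_eq_drop, l3]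
      exact e3.symm
  · rintro ⟨h1, h2⟩
    have l2 : ("{{".toList).length = 2 := by decide
    have l3 : ("}}".toList).length = 2 := by decide
    have hlen : 2 ≤ t.toList.length := by
      have := h1.length_le
      simpa [l2] using this
    rw [List.prefix_iff_eq_take, l2] at h1
    rw [List.suffix_iff_eq_drop, l3] at h2
    refine ⟨by exact_mod_cast (by omega : 1 < (t.toList.length : Int)), ?_, ?_⟩
    · rw [← h1]
      exact String.ofList_toList
    · rw [← h2]
      exact String.ofList_toList

theorem pySplit0_eq (s sep : String) (hsep : sep.toList ≠ []) :
    pySplit0 s sep = String.ofList (piece sep.toList s.toList) := by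
  unfold pySplit0
  have hne : sep.toList.isEmpty = false := by simpa [List.isEmpty_iff] using hsep
  rw [show PySem.Str.split? s sep = some ((PySem.Chars.splitOn s.toList sep.toList).map String.ofList) by
    simp [PySem.Str.split?, PySem.Chars.split?, hne]]
  obtain ⟨rest, hr⟩ := splitOn_head s.toList sep.toList hsep
  rw [hr]
  simp [PySem.List.pyGet?, PySem.List.pyIdx?]

theorem stripNl_rev : ∀ rs : List Char,
    pyStripNlLoop (String.ofList rs.reverse) = String.ofList ((rs.dropWhile (fun c => c = '\n')).reverse) := by
  intro rs
  induction rs with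
  | nil => rw [pyStripNlLoop]; simp [PySem.Str.len]
  | cons r rs ih =>
    rw [pyStripNlLoop]
    by_cases hr : r = '\n'
    · subst hr
      rw [if_pos ?hc]
      case hc =>
        constructor
        · simp [PySem.Str.len]
        · simp only [PySem.Str.pyGet?, PySem.Chars.pyGet?_eq_listPyGet?, String.toList_ofList]
          rw [List.reverse_cons, PySem.List.pyGet?_neg_ofNat _ 1 (by omega) (by simp)]
          simp
      have harg : PySem.Str.slice (String.ofList ('\n' :: rs).reverse) none (some (-1)) = String.ofList rs.reverse := by
        simp [PySem.Str.slice, PySem.List.slice_to_neg_one, List.reverse_cons, List.dropLast_concat]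
      rw [harg, ih]
      simp [List.dropWhile]
    · rw [if_neg]
      · simp [List.dropWhile, hr]
      · rintro ⟨h1, h2⟩
        simp only [PySem.Str.pyGet?, PySem.Chars.pyGet?_eq_listPyGet?, String.toList_ofList] at h2
        rw [List.reverse_cons, PySem.List.pyGet?_neg_ofNat _ 1 (by omega) (by simp)] at h2
        simp at h2
        exact hr h2

theorem stripNl_eq (t : String) :
    pyStripNlLoop t = String.ofList ((t.toList.reverse.dropWhile (fun c => c = '\n')).reverse) := by
  have := stripNl_rev t.toList.reverse
  simpa [String.ofList_toList] using this

theorem trunc_eq (t : String) :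
    piece "<|im_end|>".toList (piece "<TOKENS_UNUSED_1>\n".toList
        (piece "<eoa>\n".toList (piece "<|".toList t.toList)))
    = scanStop ["<|".toList, "<eoa>\n".toList, "<TOKENS_UNUSED_1>\n".toList, "<|im_end|>".toList]
        t.toList := by
  have hPa : pvP "<|".toList := by unfold pvP; exact ⟨by decide, by decide⟩
  have hPb : pvP "<eoa>\n".toList := by unfold pvP; exact ⟨by decide, by decide⟩
  have hPc : pvP "<TOKENS_UNUSED_1>\n".toList := by unfold pvP; exact ⟨by decide, by decide⟩
  have hPd : pvP "<|im_end|>".toList := by unfold pvP; exact ⟨by decide, by decide⟩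
  obtain ⟨w1, hw1P, hw1e, hw1l⟩ := piece_piece' (s := t.toList) hPa hPb
  rw [hw1e]
  obtain ⟨w2, hw2P, hw2e, hw2l⟩ := piece_piece' (s := t.toList) hw1P hPc
  rw [hw2e]
  obtain ⟨w3, hw3P, hw3e, hw3l⟩ := piece_piece' (s := t.toList) hw2P hPd
  rw [hw3e]
  rw [hw2l, hw1l] at hw3l
  have hsl := scan_len "<|".toList "<eoa>\n".toList "<TOKENS_UNUSED_1>\n".toList
    "<|im_end|>".toList t.toList
  have hlen : (piece w3 t.toList).length =
      (scanStop ["<|".toList, "<eoa>\n".toList, "<TOKENS_UNUSED_1>\n".toList, "<|im_end|>".toList]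
        t.toList).length := by omega
  rw [piece_eq_take w3 t.toList, scan_take, ← hlen]

theorem pv_main (text : String) : input_postprocess text = input_postprocess_alt text := by
  simp only [input_postprocess, input_postprocess_alt]
  rw [pySplit0_eq text _ (by decide)]
  rw [pySplit0_eq _ "<eoa>\n" (by decide)]
  rw [pySplit0_eq _ "<TOKENS_UNUSED_1>\n" (by decide)]
  rw [pySplit0_eq _ "<|im_end|>" (by decide)]
  simp only [String.toList_ofList]
  rw [trunc_eq text]
  generalize String.ofList (scanStop ["<|".toList, "<eoa>\n".toList, "<TOKENS_UNUSED_1>\n".toList,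
      "<|im_end|>".toList] text.toList) = T
  by_cases hb : (PySem.Str.startswith T "{{" && PySem.Str.endswith T "}}") = true
  · rw [if_pos ((unwrap_cond T).mpr hb), if_pos hb]
    exact stripNl_eq _
  · rw [if_neg (fun h => hb ((unwrap_cond T).mp h)), if_neg hb]
    exact stripNl_eq _

-- ===== VERDICT (by name: the statement is the Claim_ definition above) =====
theorem input_postprocess_spec : Claim_equal_input_postprocess := by
  intro text _
  unfold Spec_input_postprocess
  exact pv_main text
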